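-- pv_equiv track=rewrite | github.com/Engineeringstudent-Council/ESCwebsite | Development_Resources/Codebase_Cleaning/cleanup.py | splitByExtension
-- ===== SOURCE A (Python) =====
-- def splitByExtension(fileList):
--     js = []
--     css = []
--     html = []
--     for elem in fileList:
--         if elem[-3:] == '.js':
--             js.append(elem)
--         elif elem[-4:] == '.css':
--             css.append(elem)
--         elif elem[-5:] == '.html':
--             html.append(elem)
--         else:
--             raise RuntimeError("Argument to splitExtension contains an unknown extension")
--
--     return js, css, html
-- ===== SOURCE B (Python) =====
-- def splitByExtension(fileList):
--     js = [e for e in fileList if e.endswith('.js')]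
--     css = [e for e in fileList if e.endswith('.css')]
--     html = [e for e in fileList if e.endswith('.html')]
--     if len(js) + len(css) + len(html) != len(fileList):
--         raise RuntimeError("Argument to splitExtension contains an unknown extension")
--     return js, css, html
-- ===== Notes on version B (the rewrite author's own statement) =====
-- stated objective: alternative
-- what changed: Replaces the single branching loop with three accumulators by three independent endswith-filter passes plus a completeness check for the unknown-extension error.
import Mathlib
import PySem

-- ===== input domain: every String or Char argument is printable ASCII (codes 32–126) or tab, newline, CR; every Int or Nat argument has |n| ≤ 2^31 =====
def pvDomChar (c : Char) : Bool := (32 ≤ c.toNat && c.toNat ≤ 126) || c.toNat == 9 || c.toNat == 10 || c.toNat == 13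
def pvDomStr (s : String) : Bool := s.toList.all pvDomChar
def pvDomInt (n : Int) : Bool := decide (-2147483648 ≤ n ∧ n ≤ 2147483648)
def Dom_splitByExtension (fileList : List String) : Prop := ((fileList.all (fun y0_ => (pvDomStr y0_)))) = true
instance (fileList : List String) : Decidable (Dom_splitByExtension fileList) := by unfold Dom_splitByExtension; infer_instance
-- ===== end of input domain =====

-- B replaces A's single branching loop by three independent endswith-filter passes plus a
-- completeness check; same cost, different decomposition (objective: alternative).

-- ===== PORT A =====
-- A's loop over fileList with the three accumulators js/css/html; on an element matching no
-- extension Python raises RuntimeError — those inputs are excluded by Pre_ (the port returns the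
-- accumulators so far there).
def splitByExtensionLoopA (js css html : List String) :
    List String → List String × List String × List String
  | [] => (js, css, html)
  | e :: rest =>
    if PySem.Str.slice e (some (-3)) none == ".js" then
      splitByExtensionLoopA (js ++ [e]) css html rest
    else if PySem.Str.slice e (some (-4)) none == ".css" then
      splitByExtensionLoopA js (css ++ [e]) html rest
    else if PySem.Str.slice e (some (-5)) none == ".html" then
      splitByExtensionLoopA js css (html ++ [e]) rest
    else
      (js, css, html)  -- Python: raise RuntimeError (outside Pre_)

def splitByExtension (fileList : List String) : List String × List String × List String :=
  splitByExtensionLoopA [] [] [] fileList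

-- ===== PORT B =====
def splitByExtension_alt (fileList : List String) : List String × List String × List String :=
  let js := fileList.filter (fun e => PySem.Str.endswith e ".js")
  let css := fileList.filter (fun e => PySem.Str.endswith e ".css")
  let html := fileList.filter (fun e => PySem.Str.endswith e ".html")
  -- Python: if len(js)+len(css)+len(html) != len(fileList): raise RuntimeError (outside Pre_)
  (js, css, html)

-- ===== PRECONDITION & SPEC =====
-- Pre_ excludes exactly the inputs on which A (and B) raise RuntimeError: a list containing an
-- element that ends with none of '.js', '.css', '.html'.
def Pre_splitByExtension (fileList : List String) : Prop :=
  ∀ e ∈ fileList,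
    PySem.Str.endswith e ".js" = true ∨ PySem.Str.endswith e ".css" = true ∨
      PySem.Str.endswith e ".html" = true
instance (fileList : List String) : Decidable (Pre_splitByExtension fileList) := by
  unfold Pre_splitByExtension; infer_instance
def pvWitness_splitByExtension : List String := ["a.js", "b.css", "c.html", ".js"]

def Spec_splitByExtension (fileList : List String) (out : List String × List String × List String) : Prop := out = splitByExtension_alt fileList
instance (fileList : List String) (out : List String × List String × List String) : Decidable (Spec_splitByExtension fileList out) := by unfold Spec_splitByExtension; infer_instance

-- ===== CLAIM (what is proved, stated in full; the proofs are below) =====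
def Claim_equal_splitByExtension : Prop := ∀ (fileList : List String), Dom_splitByExtension fileList → Pre_splitByExtension fileList → Spec_splitByExtension fileList (splitByExtension fileList)

-- ===== LEMMAS AND PROOFS =====

-- e[-k:] == p  is exactly  e.endswith(p)  when p has length k (generic on the list side).
lemma slice_drop_eq_endswith (e p : String) (k : Nat)
    (hd : (PySem.Str.slice e (some (-(k : Int))) none).toList
        = e.toList.drop (e.toList.length - k))
    (hlen : p.toList.length = k) :
    (PySem.Str.slice e (some (-(k : Int))) none == p) = PySem.Str.endswith e p := by
  subst hlen
  rw [Bool.eq_iff_iff]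
  simp only [beq_iff_eq, PySem.Str.endswith_eq, PySem.Chars.endswith_iff]
  rw [List.suffix_iff_eq_drop, String.ext_iff, hd]
  exact eq_comm

lemma cond_js (e : String) :
    (PySem.Str.slice e (some (-3)) none == ".js") = PySem.Str.endswith e ".js" := by
  have h : ((-3 : Int)) = (-((3 : Nat) : Int)) := by norm_num
  rw [h]
  apply slice_drop_eq_endswith _ _ 3 _ (by decide)
  rw [PySem.Str.toList_slice, PySem.Chars.slice_eq_listSlice]
  exact_mod_cast PySem.List.slice_from_neg_natCast e.toList 3 (by omega)

lemma cond_css (e : String) :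
    (PySem.Str.slice e (some (-4)) none == ".css") = PySem.Str.endswith e ".css" := by
  have h : ((-4 : Int)) = (-((4 : Nat) : Int)) := by norm_num
  rw [h]
  apply slice_drop_eq_endswith _ _ 4 _ (by decide)
  rw [PySem.Str.toList_slice, PySem.Chars.slice_eq_listSlice]
  exact_mod_cast PySem.List.slice_from_neg_natCast e.toList 4 (by omega)

lemma cond_html (e : String) :
    (PySem.Str.slice e (some (-5)) none == ".html") = PySem.Str.endswith e ".html" := by
  have h : ((-5 : Int)) = (-((5 : Nat) : Int)) := by norm_num
  rw [h]
  apply slice_drop_eq_endswith _ _ 5 _ (by decide)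
  rw [PySem.Str.toList_slice, PySem.Chars.slice_eq_listSlice]
  exact_mod_cast PySem.List.slice_from_neg_natCast e.toList 5 (by omega)

-- the three suffixes are mutually exclusive
lemma excl (e p q : String) (hpq : p.toList.length ≤ q.toList.length)
    (hnot : ¬ p.toList <:+ q.toList)
    (hp : PySem.Str.endswith e p = true) : PySem.Str.endswith e q = false := by
  simp only [PySem.Str.endswith_eq, PySem.Chars.endswith_iff] at *
  by_contra hq
  rw [Bool.not_eq_false, PySem.Chars.endswith_iff] at hq
  exact hnot (List.suffix_of_suffix_length_le hp hq hpq)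

lemma loopA_eq (l : List String) (js css html : List String)
    (h : ∀ e ∈ l,
      PySem.Str.endswith e ".js" = true ∨ PySem.Str.endswith e ".css" = true ∨
        PySem.Str.endswith e ".html" = true) :
    splitByExtensionLoopA js css html l =
      (js ++ l.filter (fun e => PySem.Str.endswith e ".js"),
       css ++ l.filter (fun e => PySem.Str.endswith e ".css"),
       html ++ l.filter (fun e => PySem.Str.endswith e ".html")) := by
  induction l generalizing js css html with
  | nil => simp [splitByExtensionLoopA]
  | cons e rest ih =>
    have he := h e (by simp)
    have hrest : ∀ x ∈ rest, PySem.Str.endswith x ".js" = true ∨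
        PySem.Str.endswith x ".css" = true ∨ PySem.Str.endswith x ".html" = true :=
      fun x hx => h x (by simp [hx])
    rw [splitByExtensionLoopA, cond_js, cond_css, cond_html]
    rcases he with hjs | hcss | hhtml
    · have h2 := excl e ".js" ".css" (by decide) (by decide) hjs
      have h3 := excl e ".js" ".html" (by decide) (by decide) hjs
      rw [if_pos hjs]
      rw [ih _ _ _ hrest]
      simp [List.filter_cons]
      simp_all
    · have h1 : PySem.Str.endswith e ".js" = false := by
        by_contra hc
        rw [Bool.not_eq_false] at hc
        exact absurd hcss (by rw [excl e ".js" ".css" (by decide) (by decide) hc]; decide)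
      have h3 := excl e ".css" ".html" (by decide) (by decide) hcss
      rw [if_pos hcss]
      rw [ih _ _ _ hrest]
      simp [List.filter_cons]
      simp_all
    · have h1 : PySem.Str.endswith e ".js" = false := by
        by_contra hc
        rw [Bool.not_eq_false] at hc
        exact absurd hhtml (by rw [excl e ".js" ".html" (by decide) (by decide) hc]; decide)
      have h2 : PySem.Str.endswith e ".css" = false := by
        by_contra hc
        rw [Bool.not_eq_false] at hc
        exact absurd hhtml (by rw [excl e ".css" ".html" (by decide) (by decide) hc]; decide)
      rw [if_pos hhtml]
      rw [ih _ _ _ hrest]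
      simp [List.filter_cons]
      simp_all

-- ===== VERDICT (by name: the statement is the Claim_ definition above) =====
theorem splitByExtension_spec : Claim_equal_splitByExtension := by
  intro fileList _ hpre
  unfold Spec_splitByExtension splitByExtension splitByExtension_alt
  rw [loopA_eq fileList [] [] [] hpre]
  simp
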